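-- pv_equiv track=rewrite | github.com/tsingletaryTT/analyze_synths | generate_site.py | build_cluster_map
-- ===== SOURCE A (Python) =====
-- def build_cluster_map(cluster_data):
--     """Return dict: filename → list of filenames in the same cluster."""
--     if not cluster_data:
--         return {}
--     track_to_cluster = {}
--     cluster_tracks = {}
--     for cname, cinfo in cluster_data.items():
--         files = cinfo.get("track_files", [])
--         cluster_tracks[cname] = files
--         for f in files:
--             track_to_cluster[f] = cname
--
--     similar = {}
--     for fname, cname in track_to_cluster.items():
--         peers = [f for f in cluster_tracks[cname] if f != fname]
--         similar[fname] = peers[:4]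
--     return similar
-- ===== SOURCE B (Python) =====
-- def build_cluster_map(cluster_data):
--     """Return dict: filename -> up to 4 other filenames in the same cluster."""
--     similar = {}
--     for cinfo in cluster_data.values():
--         files = cinfo.get("track_files", [])
--         for f in files:
--             similar[f] = [g for g in files if g != f][:4]
--     return similar
-- ===== Notes on version B (the rewrite author's own statement) =====
-- stated objective: simpler
-- what changed: B drops A's two index dicts (track_to_cluster, cluster_tracks) and the separate lookup pass, filling the result directly in one grouped traversal over the clusters; dict overwrite gives the same last-cluster-wins values and first-insertion key order.
import Mathlib
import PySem

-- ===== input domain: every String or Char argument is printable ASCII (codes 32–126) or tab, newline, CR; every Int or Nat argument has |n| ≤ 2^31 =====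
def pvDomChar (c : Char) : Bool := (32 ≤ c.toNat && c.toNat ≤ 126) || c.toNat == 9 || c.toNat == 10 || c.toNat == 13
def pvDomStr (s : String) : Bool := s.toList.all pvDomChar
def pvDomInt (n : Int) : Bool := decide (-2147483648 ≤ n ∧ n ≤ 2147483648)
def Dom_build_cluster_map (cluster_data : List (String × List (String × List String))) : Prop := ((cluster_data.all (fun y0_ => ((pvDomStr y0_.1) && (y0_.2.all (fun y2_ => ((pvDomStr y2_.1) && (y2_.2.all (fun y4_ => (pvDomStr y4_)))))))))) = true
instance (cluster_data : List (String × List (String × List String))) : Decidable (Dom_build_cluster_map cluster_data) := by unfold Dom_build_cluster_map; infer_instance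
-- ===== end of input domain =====

-- B replaces A's two index dicts and separate lookup pass by one direct grouped traversal over the clusters (simpler decomposition, same cost).

-- cinfo.get("track_files", []) — first-match association-list lookup (the assoc list stands for a Python dict); shared by both ports
def pvTrackFiles (cinfo : List (String × List String)) : List String :=
  ((cinfo.find? (fun q => q.1 == "track_files")).map (·.2)).getD []

-- ===== PORT A =====
def build_cluster_map (cluster_data : List (String × List (String × List String))) : List (String × List String) :=
  if cluster_data = [] then []
  else
    -- first loop: build track_to_cluster and cluster_tracks
    let st := cluster_data.foldl
      (fun (st : PySem.Dict String String × PySem.Dict String (List String)) p =>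
        let files := pvTrackFiles p.2
        (files.foldl (fun t f => t.insert f p.1) st.1, st.2.insert p.1 files))
      (PySem.Dict.empty, PySem.Dict.empty)
    -- second loop: similar[fname] = peers[:4]
    let similar := st.1.items.foldl
      (fun sim q =>
        let peers := (st.2.getD q.2 []).filter (fun f => f != q.1)
        sim.insert q.1 (peers.take 4))
      PySem.Dict.empty
    similar.items

-- ===== PORT B =====
def build_cluster_map_alt (cluster_data : List (String × List (String × List String))) : List (String × List String) :=
  (cluster_data.foldl
    (fun (sim : PySem.Dict String (List String)) p =>
      let files := pvTrackFiles p.2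
      files.foldl (fun sim f => sim.insert f ((files.filter (fun g => g != f)).take 4)) sim)
    PySem.Dict.empty).items

-- ===== PRECONDITION & SPEC =====
-- Pre_ excludes association lists with duplicate cluster-name keys: such inputs cannot arise from a
-- Python dict (cluster_data is a dict, its keys are unique), so A's behaviour there is an artefact of the encoding.
def Pre_build_cluster_map (cluster_data : List (String × List (String × List String))) : Prop :=
  (cluster_data.map Prod.fst).Nodup
instance (cluster_data : List (String × List (String × List String))) : Decidable (Pre_build_cluster_map cluster_data) := by unfold Pre_build_cluster_map; infer_instance

def pvWitness_build_cluster_map : (List (String × List (String × List String))) :=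
  [("c1", [("track_files", ["a", "b"])]), ("c2", [("track_files", ["b", "x"])])]

def Spec_build_cluster_map (cluster_data : List (String × List (String × List String))) (out : List (String × List String)) : Prop := out = build_cluster_map_alt cluster_data
instance (cluster_data : List (String × List (String × List String))) (out : List (String × List String)) : Decidable (Spec_build_cluster_map cluster_data out) := by unfold Spec_build_cluster_map; infer_instance

-- ===== CLAIM (what is proved, stated in full; the proofs are below) =====
def Claim_equal_build_cluster_map : Prop := ∀ (cluster_data : List (String × List (String × List String))), Dom_build_cluster_map cluster_data → Pre_build_cluster_map cluster_data → Spec_build_cluster_map cluster_data (build_cluster_map cluster_data)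

-- ===== LEMMAS AND PROOFS =====

-- B's inner loop and A's track_to_cluster loop insert in parallel: if sim's items are t2c's items
-- with each value c at key f replaced by V f c, one pass over fs preserves that correspondence.
theorem pv_parallel_insert (V : String → String → List String) (c : String) (fs : List String) :
    ∀ (t2c : PySem.Dict String String) (sim : PySem.Dict String (List String)),
    sim.items = t2c.items.map (fun q => (q.1, V q.1 q.2)) →
    (fs.foldl (fun s f => s.insert f (V f c)) sim).items
      = (fs.foldl (fun t f => t.insert f c) t2c).items.map (fun q => (q.1, V q.1 q.2)) := by
  induction fs with
  | nil => intro t2c sim h; exact h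
  | cons f fs ih =>
    intro t2c sim h
    apply ih
    beta_reduce
    have hkeys : sim.keys = t2c.keys := by
      simp only [PySem.Dict.keys, h, List.map_map]
      rfl
    have hc : sim.contains f = t2c.contains f := by
      rw [PySem.Dict.contains_eq_decide_mem_keys, PySem.Dict.contains_eq_decide_mem_keys, hkeys]
    by_cases hf : t2c.contains f = true
    · rw [PySem.Dict.items_insert_of_contains sim _ (hc.trans hf),
          PySem.Dict.items_insert_of_contains t2c _ hf, h, List.map_map, List.map_map]
      apply List.map_congr_left
      intro p _
      by_cases hp : p.1 = f <;> simp [hp]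
    · have hf' : t2c.contains f = false := by simpa using hf
      rw [PySem.Dict.items_insert_of_not_contains sim _ (hc.trans hf'),
          PySem.Dict.items_insert_of_not_contains t2c _ hf', h, List.map_append]
      simp

-- membership in the items of a track_to_cluster pass
theorem pv_mem_foldl_insert (c : String) (fs : List String) :
    ∀ (t2c : PySem.Dict String String) q,
    q ∈ (fs.foldl (fun t f => t.insert f c) t2c).items → q.2 = c ∨ q ∈ t2c.items := by
  induction fs with
  | nil => intro t2c q h; exact Or.inr h
  | cons f fs ih =>
    intro t2c q h
    rcases ih _ q h with h1 | h2
    · exact Or.inl h1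
    · rcases (PySem.Dict.mem_items_insert _ _ _ _).1 h2 with h3 | h4
      · left; rw [h3]
      · exact Or.inr h4.1

theorem pv_nodup_keys_foldl (c : String) (fs : List String) (t2c : PySem.Dict String String)
    (h : t2c.keys.Nodup) : (fs.foldl (fun t f => t.insert f c) t2c).keys.Nodup := by
  exact PySem.Dict.nodup_keys_foldl_insert fs (fun _ _ => c) t2c h

-- main invariant over the cluster loop
theorem pv_main (cd : List (String × List (String × List String))) :
    ∀ (t2c : PySem.Dict String String) (ctr : PySem.Dict String (List String))
      (sim : PySem.Dict String (List String)),
    (cd.map Prod.fst).Nodup →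
    (∀ p ∈ cd, ctr.contains p.1 = false) →
    (∀ q ∈ t2c.items, ctr.contains q.2 = true) →
    sim.items = t2c.items.map (fun q => (q.1, ((ctr.getD q.2 []).filter (fun g => g != q.1)).take 4)) →
    (cd.foldl (fun sim p =>
        (pvTrackFiles p.2).foldl
          (fun sim f => sim.insert f (((pvTrackFiles p.2).filter (fun g => g != f)).take 4)) sim) sim).items
      = (let st := cd.foldl
            (fun (st : PySem.Dict String String × PySem.Dict String (List String)) p =>
              ((pvTrackFiles p.2).foldl (fun t f => t.insert f p.1) st.1, st.2.insert p.1 (pvTrackFiles p.2)))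
            (t2c, ctr)
         st.1.items.map (fun q => (q.1, ((st.2.getD q.2 []).filter (fun g => g != q.1)).take 4))) := by
  induction cd with
  | nil => intro t2c ctr sim _ _ _ hsim; simpa using hsim
  | cons p cd ih =>
    intro t2c ctr sim hnd hdisj hval hsim
    obtain ⟨cname, cinfo⟩ := p
    have hnd2 : (cname :: cd.map Prod.fst).Nodup := by simpa using hnd
    have hnd' := List.nodup_cons.1 hnd2
    have hcfresh : ctr.contains cname = false := hdisj (cname, cinfo) List.mem_cons_self
    simp only [List.foldl_cons]
    apply ih
    · simpa using hnd'.2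
    · intro q hq
      have h1 : q.1 ≠ cname := by
        intro h
        exact hnd'.1 (h ▸ List.mem_map_of_mem hq)
      have h2 := hdisj q (List.mem_cons_of_mem _ hq)
      rw [PySem.Dict.contains_insert]
      simp [h1, h2]
    · intro q hq
      rcases pv_mem_foldl_insert cname (pvTrackFiles cinfo) t2c q hq with h | h
      · rw [h]; exact PySem.Dict.contains_insert_self _ _ _
      · rw [PySem.Dict.contains_insert]; simp [hval q h]
    · have hpre : sim.items = t2c.items.map (fun q =>
          (q.1, (((ctr.insert cname (pvTrackFiles cinfo)).getD q.2 []).filter (fun g => g != q.1)).take 4)) := by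
        rw [hsim]
        apply List.map_congr_left
        intro q hq
        have hne : q.2 ≠ cname := by
          intro h
          have h2 := hval q hq
          rw [h, hcfresh] at h2
          exact Bool.false_ne_true h2
        rw [PySem.Dict.getD_insert_of_ne ctr _ _ hne]
      have hpar := pv_parallel_insert
        (fun f c' => (((ctr.insert cname (pvTrackFiles cinfo)).getD c' []).filter (fun g => g != f)).take 4)
        cname (pvTrackFiles cinfo) t2c sim hpre
      simpa [PySem.Dict.getD_insert_self] using hpar

-- the track_to_cluster dict keeps unique keys through the whole first loop
theorem pv_nodup_t2c (cd : List (String × List (String × List String))) :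
    ∀ st : PySem.Dict String String × PySem.Dict String (List String), st.1.keys.Nodup →
    ((cd.foldl (fun st p => ((pvTrackFiles p.2).foldl (fun t f => t.insert f p.1) st.1,
        st.2.insert p.1 (pvTrackFiles p.2))) st).1).keys.Nodup := by
  induction cd with
  | nil => intro st h; exact h
  | cons p cd ih =>
    intro st h
    simp only [List.foldl_cons]
    exact ih _ (pv_nodup_keys_foldl _ _ _ h)

-- ===== VERDICT (by name: the statement is the Claim_ definition above) =====
theorem build_cluster_map_spec : Claim_equal_build_cluster_map := by
  intro cd _ hpre
  unfold Spec_build_cluster_map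
  by_cases hcd : cd = []
  · subst hcd; rfl
  · have hmain := pv_main cd PySem.Dict.empty PySem.Dict.empty PySem.Dict.empty hpre
      (fun p _ => PySem.Dict.contains_empty _)
      (fun q hq => by cases hq)
      (by rfl)
    have hnodup := pv_nodup_t2c cd (PySem.Dict.empty, PySem.Dict.empty) PySem.Dict.nodup_keys_empty
    simp only [build_cluster_map, build_cluster_map_alt, if_neg hcd]
    rw [hmain]
    rw [PySem.Dict.items_foldl_insert_fresh _ Prod.fst _ PySem.Dict.empty
        (fun a _ => PySem.Dict.contains_empty _) hnodup]
    simp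
    rfl
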